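-- pv_equiv track=rewrite | github.com/dominicbeesley/chronosgamebbc | scripts/tileconv.py | shift_right
-- ===== SOURCE A (Python) =====
-- def shift_right(a,b,n,bpp):
-- 	for i in range(n):
-- 		if bpp == 1:
-- 			x = b & 1
-- 			b = (b >> 1) | ((a & 1) <<7)
-- 			a = (a >> 1) | ((x & 1) <<7)
-- 		elif bpp == 2:
-- 			x = b & 0x11
-- 			b = ((b >> 1) & 0x77) | ((a & 0x11) <<3)
-- 			a = ((a >> 1) & 0x77) | ((x & 0x11) <<3)
-- 	a = a >> ((8 // bpp) - n)
-- 	return (b,a)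
-- ===== SOURCE B (Python) =====
-- def shift_right(a, b, n, bpp):
--     # Closed form: n loop iterations of A are one rotation by m = clamp(n) bit positions.
--     if bpp == 1:
--         m = max(min(n, 8), 0)
--         mask = (1 << m) - 1
--         b, a = (b >> m) | ((a & mask) << (8 - m)), (a >> m) | ((b & mask) << (8 - m))
--     elif bpp == 2:
--         m = max(min(n, 4), 0)
--         if m > 0:
--             low = (0x00, 0x11, 0x33, 0x77, 0xFF)[m]
--             high = (0xFF, 0x77, 0x33, 0x11, 0x00)[m]
--             b, a = ((b >> m) & high) | ((a & low) << (4 - m)), ((a >> m) & high) | ((b & low) << (4 - m))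
--     a >>= (8 // bpp) - n
--     return (b, a)
-- ===== Notes on version B (the rewrite author's own statement) =====
-- stated objective: simpler
-- what changed: A rotates the byte pair one bit (bpp=1) or one nibble-plane step (bpp=2) per loop iteration n times; B computes the result of all n iterations at once with a single closed-form shift/mask rotation (clamped rotation count, one mask table), keeping A's final 'a >>= 8//bpp - n' and the bpp dispatch.
import Mathlib
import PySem

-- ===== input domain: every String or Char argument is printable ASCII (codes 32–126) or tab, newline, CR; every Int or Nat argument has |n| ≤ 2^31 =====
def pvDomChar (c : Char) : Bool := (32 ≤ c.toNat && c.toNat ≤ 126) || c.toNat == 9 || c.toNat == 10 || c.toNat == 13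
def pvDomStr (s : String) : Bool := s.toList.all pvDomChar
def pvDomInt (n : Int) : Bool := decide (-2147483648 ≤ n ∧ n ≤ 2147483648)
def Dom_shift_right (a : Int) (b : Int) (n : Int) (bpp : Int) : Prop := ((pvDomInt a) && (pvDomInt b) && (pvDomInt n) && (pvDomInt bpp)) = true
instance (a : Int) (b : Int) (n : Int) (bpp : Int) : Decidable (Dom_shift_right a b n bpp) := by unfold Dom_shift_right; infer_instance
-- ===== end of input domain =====

-- B replaces A's n-iteration bit-rotation loop by one closed-form shift/mask rotation (objective: simpler).


-- ===== PORT A =====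
-- the body of A's 'for i in range(n)' loop (A-side helper)
def loopBody (bpp : Int) (p : Int × Int) (_ : Int) : Int × Int :=
  if bpp = 1 then
    let x := PySem.Int.band p.2 1
    let b2 := PySem.Int.bor (p.2 >>> (1:Nat)) ((PySem.Int.band p.1 1) <<< (7:Nat))
    let a2 := PySem.Int.bor (p.1 >>> (1:Nat)) ((PySem.Int.band x 1) <<< (7:Nat))
    (a2, b2)
  else if bpp = 2 then
    let x := PySem.Int.band p.2 17
    let b2 := PySem.Int.bor (PySem.Int.band (p.2 >>> (1:Nat)) 119) ((PySem.Int.band p.1 17) <<< (3:Nat))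
    let a2 := PySem.Int.bor (PySem.Int.band (p.1 >>> (1:Nat)) 119) ((PySem.Int.band x 17) <<< (3:Nat))
    (a2, b2)
  else p

def shift_right (a : Int) (b : Int) (n : Int) (bpp : Int) : Int × Int :=
  let p := (PySem.List.pyRange 0 n 1).foldl (loopBody bpp) (a, b)
  -- final 'a = a >> ((8 // bpp) - n)': Python raises ZeroDivisionError for bpp = 0 and
  -- ValueError for a negative shift count; Pre_ excludes both, so '.toNat' is exact here
  (p.2, p.1 >>> (PySem.Int.floordiv 8 bpp - n).toNat)

-- ===== PORT B =====
def shift_right_alt (a : Int) (b : Int) (n : Int) (bpp : Int) : Int × Int :=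
  let q : Int × Int :=
    if bpp = 1 then
      let m : Nat := (max (min n 8) 0).toNat
      let mask : Int := (1 <<< m) - 1
      (PySem.Int.bor (a >>> m) ((PySem.Int.band b mask) <<< (8 - m)),
       PySem.Int.bor (b >>> m) ((PySem.Int.band a mask) <<< (8 - m)))
    else if bpp = 2 then
      let m : Nat := (max (min n 4) 0).toNat
      if 0 < m then
        -- tuple-table lookups (0x00,0x11,0x33,0x77,0xFF)[m] and (0xFF,0x77,0x33,0x11,0x00)[m]
        let low : Int := if m = 1 then 17 else if m = 2 then 51 else if m = 3 then 119 else 255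
        let high : Int := if m = 1 then 119 else if m = 2 then 51 else if m = 3 then 17 else 0
        (PySem.Int.bor (PySem.Int.band (a >>> m) high) ((PySem.Int.band b low) <<< (4 - m)),
         PySem.Int.bor (PySem.Int.band (b >>> m) high) ((PySem.Int.band a low) <<< (4 - m)))
      else (a, b)
    else (a, b)
  (q.2, q.1 >>> (PySem.Int.floordiv 8 bpp - n).toNat)

-- ===== PRECONDITION & SPEC =====
-- Pre_ excludes exactly the inputs where A raises: bpp = 0 (ZeroDivisionError in '8 // bpp')
-- and n > 8 // bpp (ValueError: negative shift count in the final 'a >> ((8 // bpp) - n)').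
def Pre_shift_right (a : Int) (b : Int) (n : Int) (bpp : Int) : Prop :=
  bpp ≠ 0 ∧ 0 ≤ PySem.Int.floordiv 8 bpp - n
instance (a : Int) (b : Int) (n : Int) (bpp : Int) : Decidable (Pre_shift_right a b n bpp) := by
  unfold Pre_shift_right; infer_instance
def pvWitness_shift_right : Int × Int × Int × Int := (200, 77, 3, 1)
def Spec_shift_right (a : Int) (b : Int) (n : Int) (bpp : Int) (out : Int × Int) : Prop := out = shift_right_alt a b n bpp
instance (a : Int) (b : Int) (n : Int) (bpp : Int) (out : Int × Int) : Decidable (Spec_shift_right a b n bpp out) := by unfold Spec_shift_right; infer_instance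

-- ===== CLAIM (what is proved, stated in full; the proofs are below) =====
def Claim_equal_shift_right : Prop := ∀ (a : Int) (b : Int) (n : Int) (bpp : Int), Dom_shift_right a b n bpp → Pre_shift_right a b n bpp → Spec_shift_right a b n bpp (shift_right a b n bpp)

-- ===== LEMMAS AND PROOFS =====

theorem key_sub_land (m n : Nat) : (m &&& n) + Nat.ldiff m n = m := by
  induction m using Nat.binaryRec generalizing n with
  | zero => simp [Nat.zero_and, Nat.ldiff, Nat.bitwise]
  | bit b m ih =>
    rw [← Nat.bit_testBit_zero_shiftRight_one n, Nat.land_bit, Nat.ldiff_bit,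
        Nat.bit_val, Nat.bit_val, Nat.bit_val]
    have := ih (n >>> 1)
    cases b <;> cases n.testBit 0 <;> simp at * <;> omega

theorem band_eq_land (x y : Int) : PySem.Int.band x y = Int.land x y := by
  cases x with
  | ofNat m => cases y with
    | ofNat n => simp [PySem.Int.band, Int.land]
    | negSucc n =>
      simp [PySem.Int.band, Int.land, Int.negSucc_eq]
      have := key_sub_land m n; omega
  | negSucc m => cases y with
    | ofNat n =>
      simp [PySem.Int.band, Int.land, Int.negSucc_eq]
      have := key_sub_land n m; omega
    | negSucc n =>
      simp [PySem.Int.band, Int.land, Int.negSucc_eq]; omega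

theorem bor_eq_lor (x y : Int) : PySem.Int.bor x y = Int.lor x y := by
  cases x with
  | ofNat m => cases y with
    | ofNat n => simp [PySem.Int.bor, Int.lor]
    | negSucc n =>
      simp [PySem.Int.bor, Int.lor, Int.negSucc_eq]
      have := key_sub_land n m; omega
  | negSucc m => cases y with
    | ofNat n =>
      simp [PySem.Int.bor, Int.lor, Int.negSucc_eq]
      have := key_sub_land m n; omega
    | negSucc n =>
      simp [PySem.Int.bor, Int.lor, Int.negSucc_eq]; omega

theorem tb_band (x y : Int) (k : Nat) :
    (PySem.Int.band x y).testBit k = (x.testBit k && y.testBit k) := by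
  rw [band_eq_land, Int.testBit_land]

theorem tb_bor (x y : Int) (k : Nat) :
    (PySem.Int.bor x y).testBit k = (x.testBit k || y.testBit k) := by
  rw [bor_eq_lor, Int.testBit_lor]

theorem tb_shr (x : Int) (s k : Nat) : (x >>> s).testBit k = x.testBit (s + k) := by
  cases x with
  | ofNat m =>
    show (Int.ofNat (m >>> s)).testBit k = _
    simp [Int.testBit, Nat.testBit_shiftRight]
  | negSucc m =>
    show (Int.negSucc (m >>> s)).testBit k = _
    simp [Int.testBit, Nat.testBit_shiftRight]

theorem tb_ofNat (M k : Nat) : ((M : Int)).testBit k = M.testBit k := rfl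

theorem tb_shl_nonneg (x : Int) (hx : 0 ≤ x) (s k : Nat) :
    (x <<< s).testBit k = (decide (s ≤ k) && x.testBit (k - s)) := by
  obtain ⟨m, rfl⟩ := Int.eq_ofNat_of_zero_le hx
  show (Int.ofNat (m <<< s)).testBit k = _
  simp [Int.testBit, Nat.testBit_shiftLeft, ge_iff_le]

theorem tb_ext {x y : Int} (h : ∀ k, x.testBit k = y.testBit k) : x = y := by
  cases x with
  | ofNat m => cases y with
    | ofNat n =>
      exact congrArg Int.ofNat (Nat.eq_of_testBit_eq fun i => h i)
    | negSucc n =>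
      exfalso
      have h1 : Nat.testBit m (m + n) = false := Nat.testBit_eq_false_of_lt
        (lt_of_lt_of_le (Nat.lt_two_pow_self) (Nat.pow_le_pow_right (by omega) (by omega)))
      have h2 : Nat.testBit n (m + n) = false := Nat.testBit_eq_false_of_lt
        (lt_of_lt_of_le (Nat.lt_two_pow_self) (Nat.pow_le_pow_right (by omega) (by omega)))
      have := h (m + n); simp [Int.testBit, h1, h2] at this
  | negSucc m => cases y with
    | ofNat n =>
      exfalso
      have h1 : Nat.testBit m (m + n) = false := Nat.testBit_eq_false_of_lt
        (lt_of_lt_of_le (Nat.lt_two_pow_self) (Nat.pow_le_pow_right (by omega) (by omega)))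
      have h2 : Nat.testBit n (m + n) = false := Nat.testBit_eq_false_of_lt
        (lt_of_lt_of_le (Nat.lt_two_pow_self) (Nat.pow_le_pow_right (by omega) (by omega)))
      have := h (m + n); simp [Int.testBit, h1, h2] at this
    | negSucc n =>
      have : m = n := Nat.eq_of_testBit_eq fun i => by
        have := h i; simpa [Int.testBit] using this
      rw [this]

theorem band_nonneg_right (x c : Int) (hc : 0 ≤ c) : 0 ≤ PySem.Int.band x c := by
  rw [PySem.Int.band_comm]; exact PySem.Int.band_nonneg_of_nonneg_left _ hc

theorem tb_one (k : Nat) : Nat.testBit 1 k = decide (k = 0) := by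
  cases k <;> simp [Nat.testBit_succ]

def cf1 (x y : Int) (j : Nat) : Int :=
  PySem.Int.bor (x >>> j) ((PySem.Int.band y ((1 <<< j) - 1)) <<< (8 - j))

theorem tb_shl_band_mask (x : Int) (j s k : Nat) :
    ((PySem.Int.band x ((1 <<< j : Int) - 1)) <<< s).testBit k
      = (decide (s ≤ k) && (x.testBit (k - s) && decide (k - s < j))) := by
  have h1 : ((1 <<< j : Int) - 1) = ((2 ^ j - 1 : Nat) : Int) := by
    have h2 : (1 <<< j : Int) = ((2 ^ j : Nat) : Int) := by
      show Int.ofNat (1 <<< j) = _; rw [Nat.shiftLeft_eq, one_mul]; rfl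
    rw [h2, Nat.cast_sub Nat.one_le_two_pow]; push_cast; ring
  rw [h1, tb_shl_nonneg _ (band_nonneg_right x _ (by positivity)), tb_band, tb_ofNat,
      Nat.testBit_two_pow_sub_one]

theorem tb_cf1 (x y : Int) (j k : Nat) :
    (cf1 x y j).testBit k
      = (x.testBit (j + k) || (decide (8 - j ≤ k) && (y.testBit (k - (8 - j)) && decide (k - (8 - j) < j)))) := by
  rw [cf1, tb_bor, tb_shr, tb_shl_band_mask]

theorem step1 (x y : Int) (j : Nat) (hj : j < 8) :
    PySem.Int.bor ((cf1 x y j) >>> (1:Nat)) ((PySem.Int.band (cf1 y x j) 1) <<< (7:Nat))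
      = cf1 x y (j+1) := by
  apply tb_ext; intro k
  rw [tb_bor, tb_shr, tb_cf1, tb_cf1,
      tb_shl_nonneg _ (band_nonneg_right _ _ (by norm_num)), tb_band]
  rw [show ((1:Int)).testBit (k - 7) = Nat.testBit 1 (k - 7) from rfl, tb_one, tb_cf1]
  have ex : j + (1 + k) = j + 1 + k := by omega
  rw [ex]
  rcases Nat.lt_trichotomy k 7 with hk | hk | hk
  · by_cases hg : 8 - j ≤ 1 + k
    · have ei : 1 + k - (8 - j) = k - (8 - (j+1)) := by omega
      simp only [ei]
      simp [show 8-(j+1) ≤ k from by omega, hg, show ¬(7 ≤ k) from by omega,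
            show k - (8-(j+1)) < j from by omega, show k - (8-(j+1)) < j + 1 from by omega,
            show k - (7 - j) < j from by omega, show 7 ≤ k + j from by omega,
            show k ≤ j + (7 - j) from by omega]
    · simp [hg, show ¬(8-(j+1) ≤ k) from by omega, show ¬(7 ≤ k) from by omega,
            show ¬(7 ≤ k + j) from by omega]
  · subst hk
    simp [show 8 - j ≤ 1 + 7 from by omega, show ¬(1 + 7 - (8-j) < j) from by omega,
          show 8-(j+1) ≤ 7 from by omega, show 7 - (8-(j+1)) = j from by omega,
          show 7 - (8 - (j+1)) < j + 1 from by omega, show ¬(8 - j ≤ 0) from by omega,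
          show 7 - (7 - j) = j from by omega, show 7 ≤ j + (7 - j) from by omega]
  · simp [show 8 - j ≤ 1 + k from by omega, show ¬(1 + k - (8-j) < j) from by omega,
          show ¬(k - 7 = 0) from by omega, show 8-(j+1) ≤ k from by omega,
          show ¬(k - (8-(j+1)) < j + 1) from by omega, show 7 ≤ k from by omega,
          show ¬(k ≤ j + (7 - j)) from by omega]

def low2 (j : Nat) : Int := if j = 1 then 17 else if j = 2 then 51 else if j = 3 then 119 else 255
def high2 (j : Nat) : Int := if j = 1 then 119 else if j = 2 then 51 else if j = 3 then 17 else 0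
def cf2 (x y : Int) (j : Nat) : Int :=
  PySem.Int.bor (PySem.Int.band (x >>> j) (high2 j)) ((PySem.Int.band y (low2 j)) <<< (4 - j))

theorem tb_big {M k : Nat} (hM : M < 256) (h : 8 ≤ k) : Nat.testBit M k = false :=
  Nat.testBit_eq_false_of_lt (lt_of_lt_of_le hM (le_trans (by norm_num) (Nat.pow_le_pow_right (by omega) h)))

theorem tb17N (k : Nat) : Nat.testBit 17 k = decide (k = 0 ∨ k = 4) := by
  rcases Nat.lt_or_ge k 8 with h | h
  · interval_cases k <;> decide
  · rw [tb_big (by norm_num) h]; symm; simp; omega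

theorem tb51N (k : Nat) : Nat.testBit 51 k = decide (k = 0 ∨ k = 1 ∨ k = 4 ∨ k = 5) := by
  rcases Nat.lt_or_ge k 8 with h | h
  · interval_cases k <;> decide
  · rw [tb_big (by norm_num) h]; symm; simp; omega

theorem tb119N (k : Nat) : Nat.testBit 119 k = decide (k < 7 ∧ ¬ k = 3) := by
  rcases Nat.lt_or_ge k 8 with h | h
  · interval_cases k <;> decide
  · rw [tb_big (by norm_num) h]; symm; simp; omega

theorem tb255N (k : Nat) : Nat.testBit 255 k = decide (k < 8) := by
  rcases Nat.lt_or_ge k 8 with h | h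
  · interval_cases k <;> decide
  · rw [tb_big (by norm_num) h]; symm; simp; omega

theorem tbI17 (k : Nat) : ((17:Int)).testBit k = Nat.testBit 17 k := rfl
theorem tbI51 (k : Nat) : ((51:Int)).testBit k = Nat.testBit 51 k := rfl
theorem tbI119 (k : Nat) : ((119:Int)).testBit k = Nat.testBit 119 k := rfl
theorem tbI255 (k : Nat) : ((255:Int)).testBit k = Nat.testBit 255 k := rfl
theorem tbI0 (k : Nat) : ((0:Int)).testBit k = false := by
  show (Int.ofNat 0).testBit k = false
  simp [Int.testBit]

theorem base2 (x y : Int) :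
    PySem.Int.bor (PySem.Int.band (x >>> (1:Nat)) 119) ((PySem.Int.band y 17) <<< (3:Nat))
      = cf2 x y 1 := by
  norm_num [cf2, low2, high2]

theorem band_mask_idem (t c : Int) : PySem.Int.band (PySem.Int.band t c) c = PySem.Int.band t c := by
  apply tb_ext; intro k
  simp [tb_band, Bool.and_assoc]

theorem tb_shl_band17 (x : Int) (s k : Nat) :
    ((PySem.Int.band x 17) <<< s).testBit k
      = (decide (s ≤ k) && (x.testBit (k - s) && decide (k - s = 0 ∨ k - s = 4))) := by
  rw [tb_shl_nonneg _ (band_nonneg_right _ _ (by norm_num)), tb_band, tbI17, tb17N]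

theorem tb_band17 (x : Int) (k : Nat) :
    (PySem.Int.band x 17).testBit k = (x.testBit k && decide (k = 0 ∨ k = 4)) := by
  rw [tb_band, tbI17, tb17N]

theorem tb_band119 (x : Int) (k : Nat) :
    (PySem.Int.band x 119).testBit k = (x.testBit k && decide (k < 7 ∧ ¬ k = 3)) := by
  rw [tb_band, tbI119, tb119N]

theorem tb_band51 (x : Int) (k : Nat) :
    (PySem.Int.band x 51).testBit k = (x.testBit k && decide (k = 0 ∨ k = 1 ∨ k = 4 ∨ k = 5)) := by
  rw [tb_band, tbI51, tb51N]

theorem tb_band255 (x : Int) (k : Nat) :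
    (PySem.Int.band x 255).testBit k = (x.testBit k && decide (k < 8)) := by
  rw [tb_band, tbI255, tb255N]

theorem tb_band0 (x : Int) (k : Nat) :
    (PySem.Int.band x 0).testBit k = false := by
  rw [tb_band, tbI0, Bool.and_false]

theorem tb_shl_band51 (x : Int) (s k : Nat) :
    ((PySem.Int.band x 51) <<< s).testBit k
      = (decide (s ≤ k) && (x.testBit (k - s) && decide (k - s = 0 ∨ k - s = 1 ∨ k - s = 4 ∨ k - s = 5))) := by
  rw [tb_shl_nonneg _ (band_nonneg_right _ _ (by norm_num)), tb_band51]

theorem tb_shl_band119 (x : Int) (s k : Nat) :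
    ((PySem.Int.band x 119) <<< s).testBit k
      = (decide (s ≤ k) && (x.testBit (k - s) && decide (k - s < 7 ∧ ¬ k - s = 3))) := by
  rw [tb_shl_nonneg _ (band_nonneg_right _ _ (by norm_num)), tb_band119]

theorem tb_shl_band255 (x : Int) (s k : Nat) :
    ((PySem.Int.band x 255) <<< s).testBit k
      = (decide (s ≤ k) && (x.testBit (k - s) && decide (k - s < 8))) := by
  rw [tb_shl_nonneg _ (band_nonneg_right _ _ (by norm_num)), tb_band255]

theorem step2 (x y : Int) (j : Nat) (h1 : 1 ≤ j) (hj : j < 4) :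
    PySem.Int.bor (PySem.Int.band ((cf2 x y j) >>> (1:Nat)) 119)
        ((PySem.Int.band (cf2 y x j) 17) <<< (3:Nat)) = cf2 x y (j+1) := by
  interval_cases j <;>
  · apply tb_ext; intro k
    norm_num [cf2, low2, high2]
    simp only [tb_bor, tb_shr, tb_band17, tb_band119, tb_band51, tb_band255, tb_band0,
               tb_shl_band17, tb_shl_band51, tb_shl_band119, tb_shl_band255, tbI0]
    rcases Nat.lt_or_ge k 16 with hk | hk
    · interval_cases k <;> simp [tbI0]
    · simp [show ¬(k < 7 ∧ ¬k = 3) from by omega, show ¬(k - 3 = 0 ∨ k - 3 = 4) from by omega,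
             show ¬(k = 0 ∨ k = 1 ∨ k = 4 ∨ k = 5) from by omega,
             show ¬(k - 2 = 0 ∨ k - 2 = 1 ∨ k - 2 = 4 ∨ k - 2 = 5) from by omega,
             show ¬(k = 0 ∨ k = 4) from by omega, show ¬(k - 1 < 7 ∧ ¬k - 1 = 3) from by omega,
             show ¬(k < 8) from by omega, show ¬(k - 1 < 7) from by omega]

-- cf1/cf2 describe the loop state after j iterations; connect them to loopBody
theorem cf1_zero (x y : Int) : cf1 x y 0 = x := by
  simp [cf1, PySem.Int.band_zero, PySem.Int.bor_zero, Int.shiftRight_zero]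

theorem loopBody1_cf (a b : Int) (j : Nat) (hj : j < 8) (e : Int) :
    loopBody 1 (cf1 a b j, cf1 b a j) e = (cf1 a b (j+1), cf1 b a (j+1)) := by
  simp only [loopBody, if_pos rfl]
  rw [band_mask_idem, step1 a b j hj, step1 b a j hj]; simp

theorem fold1 (l : List Int) (a b : Int) (j : Nat) (h : j + l.length ≤ 8) :
    l.foldl (loopBody 1) (cf1 a b j, cf1 b a j)
      = (cf1 a b (j + l.length), cf1 b a (j + l.length)) := by
  induction l generalizing j with
  | nil => simp
  | cons e t ih =>
    simp only [List.foldl_cons, List.length_cons]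
    rw [loopBody1_cf a b j (by simp at h; omega) e, ih (j+1) (by simp at h; omega)]
    congr 2 <;> omega

theorem loopBody2_first (a b : Int) (e : Int) :
    loopBody 2 (a, b) e = (cf2 a b 1, cf2 b a 1) := by
  simp only [loopBody, if_neg (by norm_num : ¬(2:Int) = 1), if_pos rfl]
  rw [band_mask_idem, base2, base2]; simp

theorem loopBody2_cf (a b : Int) (j : Nat) (h1 : 1 ≤ j) (hj : j < 4) (e : Int) :
    loopBody 2 (cf2 a b j, cf2 b a j) e = (cf2 a b (j+1), cf2 b a (j+1)) := by
  simp only [loopBody, if_neg (by norm_num : ¬(2:Int) = 1), if_pos rfl]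
  rw [band_mask_idem, step2 a b j h1 hj, step2 b a j h1 hj]; simp

theorem fold2 (l : List Int) (a b : Int) (j : Nat) (h1 : 1 ≤ j) (h : j + l.length ≤ 4) :
    l.foldl (loopBody 2) (cf2 a b j, cf2 b a j)
      = (cf2 a b (j + l.length), cf2 b a (j + l.length)) := by
  induction l generalizing j with
  | nil => simp
  | cons e t ih =>
    simp only [List.foldl_cons, List.length_cons]
    rw [loopBody2_cf a b j h1 (by simp at h; omega) e, ih (j+1) (by omega) (by simp at h; omega)]
    congr 2 <;> omega

theorem fold_other (l : List Int) (p : Int × Int) (bpp : Int) (h1 : bpp ≠ 1) (h2 : bpp ≠ 2) :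
    l.foldl (loopBody bpp) p = p := by
  induction l with
  | nil => rfl
  | cons e t ih => simp only [List.foldl_cons, loopBody, if_neg h1, if_neg h2]; exact ih

theorem pyRange_len (n : Int) : (PySem.List.pyRange 0 n 1).length = n.toNat := by
  rw [PySem.List.length_pyRange_one]; omega

theorem pyRange_nil (n : Int) (h : n ≤ 0) : PySem.List.pyRange 0 n 1 = [] :=
  List.eq_nil_of_length_eq_zero (by rw [pyRange_len]; omega)

-- ===== VERDICT (by name: the statement is the Claim_ definition above) =====
theorem shift_right_spec : Claim_equal_shift_right := by
  intro a b n bpp _ hpre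
  obtain ⟨hb0, hsh⟩ := hpre
  unfold Spec_shift_right shift_right shift_right_alt
  by_cases h1 : bpp = 1
  · subst h1
    have hfd : PySem.Int.floordiv 8 1 = 8 := by decide
    have hn : n ≤ 8 := by rw [hfd] at hsh; omega
    have hm : (max (min n 8) 0).toNat = n.toNat := by omega
    have : (PySem.List.pyRange 0 n 1).foldl (loopBody 1) (a, b)
        = (cf1 a b n.toNat, cf1 b a n.toNat) := by
      have h0 := fold1 (PySem.List.pyRange 0 n 1) a b 0 (by rw [pyRange_len]; omega)
      rw [cf1_zero, cf1_zero] at h0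
      rw [h0, pyRange_len]; norm_num
    rw [this]
    norm_num [hm, cf1]
  · by_cases h2 : bpp = 2
    · subst h2
      have hfd : PySem.Int.floordiv 8 2 = 4 := by decide
      have hn : n ≤ 4 := by rw [hfd] at hsh; omega
      by_cases hn0 : n ≤ 0
      · rw [pyRange_nil n hn0]
        have hm : (max (min n 4) 0).toNat = 0 := by omega
        norm_num [hm]
      · have hm : (max (min n 4) 0).toNat = n.toNat := by omega
        rw [PySem.List.pyRange_one_cons (show (0:Int) < n by omega), List.foldl_cons,
            loopBody2_first]
        have hlen : (PySem.List.pyRange (0+1) n 1).length = (n-1).toNat := by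
          rw [PySem.List.length_pyRange_one]; omega
        rw [fold2 _ a b 1 (by omega) (by rw [hlen]; omega), hlen,
            show 1 + (n-1).toNat = n.toNat from by omega]
        norm_num [hm, cf2, low2, high2, show ¬((2:Int) = 1) from by norm_num,
                  show (0:Nat) < n.toNat from by omega]
    · rw [fold_other _ _ bpp h1 h2]
      simp only [if_neg h1, if_neg h2]
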